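-- pv_equiv track=rewrite | github.com/Fkhrayef/cluster-optimization | main.py | calculate_internal_edge_weights
-- ===== SOURCE A (Python) =====
-- def calculate_internal_edge_weights(clusters, edges):
--     total_weight = 0
--     for cluster in clusters.values():
--         for i in range(len(cluster)):
--             for j in range(i + 1, len(cluster)):
--                 node_i, node_j = cluster[i], cluster[j]
--                 # Check if the edge exists in either direction
--                 total_weight += edges.get((node_i, node_j), 0)  # Avoid redundant checks
--     return total_weight
-- ===== SOURCE B (Python) =====
-- def calculate_internal_edge_weights(clusters, edges):
--     # Count every ordered within-cluster pair once, then weigh the edges in a single pass.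
--     pair_count = {}
--     for cluster in clusters.values():
--         for i, u in enumerate(cluster):
--             for v in cluster[i + 1:]:
--                 pair_count[(u, v)] = pair_count.get((u, v), 0) + 1
--     total = 0
--     for key, w in edges.items():
--         total += w * pair_count.get(key, 0)
--     return total
-- ===== Notes on version B (the rewrite author's own statement) =====
-- stated objective: alternative
-- what changed: B replaces A's per-pair dict lookup with a pair-count dict built once over the clusters and a single weighted pass over the edges; the Lean-side Pre_ only excludes association lists with duplicated edge keys, which no Python dict input can have.
import Mathlib
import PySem

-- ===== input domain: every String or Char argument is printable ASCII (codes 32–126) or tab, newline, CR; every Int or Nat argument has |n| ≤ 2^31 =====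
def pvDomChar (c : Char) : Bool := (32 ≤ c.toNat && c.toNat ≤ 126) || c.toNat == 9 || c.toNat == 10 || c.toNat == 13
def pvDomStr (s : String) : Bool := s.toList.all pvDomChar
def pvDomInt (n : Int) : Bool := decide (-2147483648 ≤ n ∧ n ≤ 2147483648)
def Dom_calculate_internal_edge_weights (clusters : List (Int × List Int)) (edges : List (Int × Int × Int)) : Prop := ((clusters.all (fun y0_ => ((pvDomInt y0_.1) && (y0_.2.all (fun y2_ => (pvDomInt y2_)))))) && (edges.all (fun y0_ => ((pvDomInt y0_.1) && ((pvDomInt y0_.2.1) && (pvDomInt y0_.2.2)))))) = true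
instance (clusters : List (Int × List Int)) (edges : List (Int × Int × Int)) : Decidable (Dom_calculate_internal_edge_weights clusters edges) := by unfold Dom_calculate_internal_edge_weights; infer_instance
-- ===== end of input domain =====

-- B counts each ordered within-cluster pair once into a dict, then weighs the edges in one pass,
-- instead of A's dict lookup for every pair (objective: alternative decomposition of the same sum).

-- ===== PORT A =====
-- edges.get((u, v), 0) on the association-list model of the dict: first matching key, default 0
def edgesGet (edges : List (Int × Int × Int)) (u v : Int) : Int :=
  match edges.find? (fun e => e.1 == u && e.2.1 == v) with
  | some e => e.2.2
  | none => 0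

def calculate_internal_edge_weights (clusters : List (Int × List Int)) (edges : List (Int × Int × Int)) : Int :=
  clusters.foldl (fun total cl =>
    (PySem.List.pyRange 0 (PySem.List.len cl.2) 1).foldl (fun total i =>
      (PySem.List.pyRange (i + 1) (PySem.List.len cl.2) 1).foldl (fun total j =>
        total + edgesGet edges (PySem.List.pyGetD cl.2 i 0) (PySem.List.pyGetD cl.2 j 0)) total) total) 0

-- ===== PORT B =====
def calculate_internal_edge_weights_alt (clusters : List (Int × List Int)) (edges : List (Int × Int × Int)) : Int :=
  let pair_count : PySem.Dict (Int × Int) Int :=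
    clusters.foldl (fun pc cl =>
      (PySem.List.enumerate cl.2 0).foldl (fun pc iu =>
        (PySem.List.slice cl.2 (some (iu.1 + 1)) none).foldl (fun pc v =>
          pc.insert (iu.2, v) (pc.getD (iu.2, v) 0 + 1)) pc) pc) PySem.Dict.empty
  edges.foldl (fun total e => total + e.2.2 * pair_count.getD (e.1, e.2.1) 0) 0

-- ===== PRECONDITION & SPEC =====
-- Pre_ only excludes association lists whose edge keys are duplicated; a Python dict cannot have
-- duplicate keys, so every dict input the Python programs accept satisfies it (no Python input is excluded).
def Pre_calculate_internal_edge_weights (clusters : List (Int × List Int)) (edges : List (Int × Int × Int)) : Prop :=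
  (edges.map (fun e => (e.1, e.2.1))).Nodup
instance (clusters : List (Int × List Int)) (edges : List (Int × Int × Int)) : Decidable (Pre_calculate_internal_edge_weights clusters edges) := by unfold Pre_calculate_internal_edge_weights; infer_instance
def pvWitness_calculate_internal_edge_weights : (List (Int × List Int)) × (List (Int × Int × Int)) :=
  ([(0, [1, 2, 3])], [(1, 2, 5), (2, 3, 7)])
def Spec_calculate_internal_edge_weights (clusters : List (Int × List Int)) (edges : List (Int × Int × Int)) (out : Int) : Prop := out = calculate_internal_edge_weights_alt clusters edges
instance (clusters : List (Int × List Int)) (edges : List (Int × Int × Int)) (out : Int) : Decidable (Spec_calculate_internal_edge_weights clusters edges out) := by unfold Spec_calculate_internal_edge_weights; infer_instance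

-- ===== CLAIM (what is proved, stated in full; the proofs are below) =====
def Claim_equal_calculate_internal_edge_weights : Prop := ∀ (clusters : List (Int × List Int)) (edges : List (Int × Int × Int)), Dom_calculate_internal_edge_weights clusters edges → Pre_calculate_internal_edge_weights clusters edges → Spec_calculate_internal_edge_weights clusters edges (calculate_internal_edge_weights clusters edges)

-- ===== LEMMAS AND PROOFS =====

-- the ordered within-cluster pairs both programs enumerate
def clPairs (c : List Int) : List (Int × Int) :=
  (PySem.List.enumerate c 0).flatMap (fun iu =>
    (PySem.List.slice c (some (iu.1 + 1)) none).map (fun v => (iu.2, v)))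

def allPairs (clusters : List (Int × List Int)) : List (Int × Int) :=
  clusters.flatMap (fun cl => clPairs cl.2)

lemma foldl_foldl_flatMap {α β γ : Type} (g : α → List β) (h : γ → β → γ)
    (xs : List α) (init : γ) :
    xs.foldl (fun acc x => (g x).foldl h acc) init = (xs.flatMap g).foldl h init := by
  induction xs generalizing init with
  | nil => rfl
  | cons x xs ih => simp [List.flatMap_cons, List.foldl_append, ih]

lemma fst_nonneg_of_mem_enumerate {iu : Int × Int} {c : List Int}
    (hm : iu ∈ PySem.List.enumerate c 0) : 0 ≤ iu.1 := by
  have h1 : iu.1 ∈ (PySem.List.enumerate c 0).map (·.1) := List.mem_map_of_mem hm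
  rw [PySem.List.map_fst_enumerate] at h1
  exact (PySem.List.mem_pyRange_one.1 h1).1

-- A's i/j loops over one cluster are the fold of the lookup over clPairs
lemma edgesGet_cons (e : Int × Int × Int) (es : List (Int × Int × Int)) (u v : Int) :
    edgesGet (e :: es) u v = if e.1 = u ∧ e.2.1 = v then e.2.2 else edgesGet es u v := by
  unfold edgesGet
  rw [List.find?_cons]
  by_cases h : e.1 = u ∧ e.2.1 = v
  · simp [h.1, h.2]
  · have hb : (e.1 == u && e.2.1 == v) = false := by
      simp only [Bool.and_eq_false_iff, beq_eq_false_iff_ne, ne_eq]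
      tauto
    rw [hb, if_neg h]

lemma middleA (edges : List (Int × Int × Int)) (c : List Int) (t : Int) :
    (PySem.List.pyRange 0 (PySem.List.len c) 1).foldl (fun total i =>
      (PySem.List.pyRange (i + 1) (PySem.List.len c) 1).foldl (fun total j =>
        total + edgesGet edges (PySem.List.pyGetD c i 0) (PySem.List.pyGetD c j 0)) total) t
    = (clPairs c).foldl (fun total p => total + edgesGet edges p.1 p.2) t := by
  have h1 : (PySem.List.pyRange 0 (PySem.List.len c) 1).foldl (fun total i =>
      (PySem.List.pyRange (i + 1) (PySem.List.len c) 1).foldl (fun total j =>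
        total + edgesGet edges (PySem.List.pyGetD c i 0) (PySem.List.pyGetD c j 0)) total) t
      = (PySem.List.enumerate c 0).foldl (fun total iu =>
      (PySem.List.pyRange (iu.1 + 1) (PySem.List.len c) 1).foldl (fun total j =>
        total + edgesGet edges iu.2 (PySem.List.pyGetD c j 0)) total) t := by
    rw [PySem.List.enumerate_eq_map_pyRange (d := 0), List.foldl_map]
  rw [h1, clPairs, ← foldl_foldl_flatMap]
  apply PySem.List.foldl_congr_mem
  intro acc iu hm
  have h0 : 0 ≤ iu.1 := fst_nonneg_of_mem_enumerate hm
  rw [PySem.List.foldl_pyRange_pyGetD c 0 (fun total v => total + edgesGet edges iu.2 v) acc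
        (show (0:Int) ≤ iu.1 + 1 by omega),
      PySem.List.slice_from c (show (0:Int) ≤ iu.1 + 1 by omega), List.foldl_map]

-- A is the fold of the lookup over all pairs
lemma A_eq (clusters : List (Int × List Int)) (edges : List (Int × Int × Int)) :
    calculate_internal_edge_weights clusters edges
      = ((allPairs clusters).map (fun p => edgesGet edges p.1 p.2)).sum := by
  unfold calculate_internal_edge_weights
  have h : ∀ (total : Int), ∀ cl ∈ clusters,
      (PySem.List.pyRange 0 (PySem.List.len cl.2) 1).foldl (fun total i =>
        (PySem.List.pyRange (i + 1) (PySem.List.len cl.2) 1).foldl (fun total j =>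
          total + edgesGet edges (PySem.List.pyGetD cl.2 i 0) (PySem.List.pyGetD cl.2 j 0)) total) total
      = (clPairs cl.2).foldl (fun total p => total + edgesGet edges p.1 p.2) total :=
    fun total cl _ => middleA edges cl.2 total
  refine (PySem.List.foldl_congr_mem _ _ _ _ h).trans ?_
  rw [foldl_foldl_flatMap (fun cl => clPairs cl.2)
        (fun total p => total + edgesGet edges p.1 p.2) clusters 0,
      PySem.List.foldl_add]
  simp [allPairs]

-- B's counting dict is Counter(allPairs)
lemma pc_eq (clusters : List (Int × List Int)) :
    clusters.foldl (fun pc cl =>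
      (PySem.List.enumerate cl.2 0).foldl (fun pc iu =>
        (PySem.List.slice cl.2 (some (iu.1 + 1)) none).foldl (fun pc v =>
          pc.insert (iu.2, v) (pc.getD (iu.2, v) 0 + 1)) pc) pc) PySem.Dict.empty
    = PySem.Dict.counter (allPairs clusters) := by
  have h : ∀ (pc : PySem.Dict (Int × Int) Int), ∀ cl ∈ clusters,
      (PySem.List.enumerate cl.2 0).foldl (fun pc iu =>
        (PySem.List.slice cl.2 (some (iu.1 + 1)) none).foldl (fun pc v =>
          pc.insert (iu.2, v) (pc.getD (iu.2, v) 0 + 1)) pc) pc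
      = (clPairs cl.2).foldl (fun d p => d.insert p (d.getD p 0 + 1)) pc := by
    intro pc cl _
    rw [clPairs, ← foldl_foldl_flatMap]
    apply PySem.List.foldl_congr_mem
    intro acc iu _
    rw [List.foldl_map]
  refine ((PySem.List.foldl_congr_mem _ _ _ _ h).trans
    (foldl_foldl_flatMap (fun cl => clPairs cl.2) _ clusters PySem.Dict.empty)).trans ?_
  show (allPairs clusters).foldl _ _ = _
  rw [PySem.Dict.foldl_insert_getD_add_one_eq_counter]

lemma edgesGet_eq_zero (es : List (Int × Int × Int)) (u v : Int)
    (h : (u, v) ∉ es.map (fun e => (e.1, e.2.1))) : edgesGet es u v = 0 := by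
  unfold edgesGet
  rw [List.find?_eq_none.2]
  intro e he
  simp only [Bool.and_eq_true, beq_iff_eq, not_and]
  intro h1 h2
  apply h
  rw [← h1, ← h2]
  exact List.mem_map_of_mem he

lemma sum_ite_count (k : Int × Int) (w : Int) (P : List (Int × Int)) :
    (P.map (fun p => if k = p then w else 0)).sum = w * (P.count k : Int) := by
  induction P with
  | nil => simp
  | cons p P ih =>
    by_cases h : k = p
    · subst h
      simp only [List.map_cons, List.sum_cons, ih, List.count_cons_self]
      push_cast
      ring
    · have hb : (p == k) = false := beq_eq_false_iff_ne.2 (fun hh => h hh.symm)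
      simp only [List.map_cons, List.sum_cons, if_neg h, ih, List.count_cons, hb]
      simp

-- the sum of lookups over the pairs equals the weighted pair-counts over the edges
lemma core (P : List (Int × Int)) (es : List (Int × Int × Int))
    (hnd : (es.map (fun e => (e.1, e.2.1))).Nodup) :
    (P.map (fun p => edgesGet es p.1 p.2)).sum
      = (es.map (fun e => e.2.2 * (P.count (e.1, e.2.1) : Int))).sum := by
  induction es with
  | nil =>
    have h0 : ∀ p : Int × Int, edgesGet [] p.1 p.2 = 0 := fun _ => rfl
    simp [h0]
  | cons e es ih =>
    rw [List.map_cons, List.nodup_cons] at hnd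
    have hkey : (e.1, e.2.1) ∉ es.map (fun e => (e.1, e.2.1)) := hnd.1
    have hcons : ∀ p : Int × Int, edgesGet (e :: es) p.1 p.2
        = (if (e.1, e.2.1) = p then e.2.2 else 0) + edgesGet es p.1 p.2 := by
      intro p
      rw [edgesGet_cons]
      by_cases hc : (e.1, e.2.1) = p
      · subst hc
        rw [if_pos ⟨rfl, rfl⟩, if_pos rfl]
        simp [edgesGet_eq_zero es e.1 e.2.1 hkey]
      · rw [if_neg (by simp only [Prod.ext_iff] at hc; simpa using hc), if_neg hc]
        omega
    calc (P.map (fun p => edgesGet (e :: es) p.1 p.2)).sum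
        = (P.map (fun p => (if (e.1, e.2.1) = p then e.2.2 else 0) + edgesGet es p.1 p.2)).sum := by
          exact congrArg List.sum (List.map_congr_left (fun p _ => hcons p))
      _ = (P.map (fun p => if (e.1, e.2.1) = p then e.2.2 else 0)).sum
            + (P.map (fun p => edgesGet es p.1 p.2)).sum := by
          rw [PySem.List.sum_map_add_int]
      _ = e.2.2 * (P.count (e.1, e.2.1) : Int)
            + (es.map (fun e => e.2.2 * (P.count (e.1, e.2.1) : Int))).sum := by
          rw [sum_ite_count, ih hnd.2]
      _ = ((e :: es).map (fun e => e.2.2 * (P.count (e.1, e.2.1) : Int))).sum := by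
          simp

lemma B_eq (clusters : List (Int × List Int)) (edges : List (Int × Int × Int)) :
    calculate_internal_edge_weights_alt clusters edges
      = (edges.map (fun e => e.2.2 * ((allPairs clusters).count (e.1, e.2.1) : Int))).sum := by
  unfold calculate_internal_edge_weights_alt
  rw [pc_eq]
  rw [PySem.List.foldl_add edges
        (fun e => e.2.2 * (PySem.Dict.counter (allPairs clusters)).getD (e.1, e.2.1) 0) 0]
  simp [PySem.Dict.getD_counter]

-- ===== VERDICT (by name: the statement is the Claim_ definition above) =====
theorem calculate_internal_edge_weights_spec : Claim_equal_calculate_internal_edge_weights := by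
  intro clusters edges _ hpre
  unfold Spec_calculate_internal_edge_weights
  rw [A_eq, B_eq]
  exact core (allPairs clusters) edges hpre
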